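-- pv_equiv track=rewrite | github.com/LancelotYe/TomQuant | TomProject/Tom_Strategy.py | ifHigherThanNext
-- ===== SOURCE A (Python) =====
-- def ifHigherThanNext(index, array):
--     if index==len(array)-1:
--         return True
--     if array[index]>array[index+1]:
--         return True
--     elif array[index]==array[index+1]:
--         return ifHigherThanNext(index+1, array)
--     else:
--         return False
-- ===== SOURCE B (Python) =====
-- def ifHigherThanNext(index, array):
--     for j in range(index, len(array) - 1):
--         if array[j] != array[j + 1]:
--             return array[j] > array[j + 1]
--     return True
-- ===== Notes on version B (the rewrite author's own statement) =====
-- stated objective: simpler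
-- what changed: Replaced the advance-through-equal-runs recursion by a single for-loop over range(index, len(array)-1) that returns the comparison at the first unequal adjacent pair (True after the loop), with no explicit equality branch or recursive call.
-- outside the precondition, e.g. on ifHigherThanNext(5, [1, 2, 3]): A raises IndexError, B returns True
import Mathlib
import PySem

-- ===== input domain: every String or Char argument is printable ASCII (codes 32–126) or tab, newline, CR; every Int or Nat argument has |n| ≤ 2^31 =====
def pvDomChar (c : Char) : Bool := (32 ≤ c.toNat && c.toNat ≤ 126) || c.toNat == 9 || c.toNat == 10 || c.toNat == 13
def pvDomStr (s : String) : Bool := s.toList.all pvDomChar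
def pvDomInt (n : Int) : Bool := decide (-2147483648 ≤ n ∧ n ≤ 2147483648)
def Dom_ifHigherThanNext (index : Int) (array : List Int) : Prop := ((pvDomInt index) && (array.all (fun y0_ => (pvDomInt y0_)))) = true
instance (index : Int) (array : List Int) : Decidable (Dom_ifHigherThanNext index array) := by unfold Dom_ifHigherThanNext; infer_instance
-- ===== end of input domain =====

-- B replaces A's advance-through-equal-runs recursion by one for-loop over range(index, len-1)
-- that answers at the first unequal adjacent pair (objective: simpler). Return values only; no mutation.

-- ===== PORT A =====
-- Literal port of A's recursion; array[i] is PySem.List.pyGet? (none = IndexError, excluded by Pre_).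
def ifHigherThanNext (index : Int) (array : List Int) : Bool :=
  if index = (array.length : Int) - 1 then true
  else
    match PySem.List.pyGet? array index with
    | none => false   -- IndexError in Python; outside Pre_
    | some a =>
      match h2 : PySem.List.pyGet? array (index + 1) with
      | none => false   -- IndexError in Python; outside Pre_
      | some b =>
        if a > b then true
        else if a = b then ifHigherThanNext (index + 1) array
        else false
termination_by ((array.length : Int) - 1 - index).toNat
decreasing_by
  have hne : PySem.List.pyGet? array (index + 1) ≠ none := by rw [h2]; exact Option.some_ne_none _
  have hin : PySem.Raise.InRange array.length (index + 1) := by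
    by_contra hc
    exact hne ((PySem.List.pyGet?_eq_none_iff array (index + 1)).mpr hc)
  unfold PySem.Raise.InRange at hin
  omega

-- ===== PORT B =====
-- Port of Source B's for-loop: structural recursion over the list range(index, len(array)-1).
def pvAltGo (array : List Int) : List Int → Bool
  | [] => true
  | j :: rest =>
    match PySem.List.pyGet? array j, PySem.List.pyGet? array (j + 1) with
    | some a, some b =>
        if a ≠ b then decide (a > b) else pvAltGo array rest
    | some _, none => false   -- IndexError in Python; outside Pre_
    | none, _ => false   -- IndexError in Python; outside Pre_

def ifHigherThanNext_alt (index : Int) (array : List Int) : Bool :=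
  pvAltGo array (PySem.List.pyRange index ((array.length : Int) - 1) 1)

-- ===== PRECONDITION & SPEC =====
-- Pre_ excludes exactly the inputs where A raises IndexError: index out of Python's
-- (negative-wrapping) range, except index = len-1 where the base case returns first.
def Pre_ifHigherThanNext (index : Int) (array : List Int) : Prop :=
  (-(array.length : Int) ≤ index ∧ index < (array.length : Int)) ∨ index = (array.length : Int) - 1
instance (index : Int) (array : List Int) : Decidable (Pre_ifHigherThanNext index array) := by
  unfold Pre_ifHigherThanNext; infer_instance

def pvWitness_ifHigherThanNext : Int × List Int := (0, [3, 3, 2])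

def Spec_ifHigherThanNext (index : Int) (array : List Int) (out : Bool) : Prop := out = ifHigherThanNext_alt index array
instance (index : Int) (array : List Int) (out : Bool) : Decidable (Spec_ifHigherThanNext index array out) := by unfold Spec_ifHigherThanNext; infer_instance

-- ===== CLAIM (what is proved, stated in full; the proofs are below) =====
def Claim_equal_ifHigherThanNext : Prop := ∀ (index : Int) (array : List Int), Dom_ifHigherThanNext index array → Pre_ifHigherThanNext index array → Spec_ifHigherThanNext index array (ifHigherThanNext index array)

-- ===== LEMMAS AND PROOFS =====

lemma pyGet?_some_bounds (xs : List Int) (i x : Int)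
    (h : PySem.List.pyGet? xs i = some x) :
    -(xs.length : Int) ≤ i ∧ i < (xs.length : Int) := by
  have hne : PySem.List.pyGet? xs i ≠ none := by rw [h]; exact Option.some_ne_none _
  have hin : PySem.Raise.InRange xs.length i := by
    by_contra hc
    exact hne ((PySem.List.pyGet?_eq_none_iff xs i).mpr hc)
  unfold PySem.Raise.InRange at hin
  omega

lemma key_equiv : ∀ (index : Int) (array : List Int),
    Pre_ifHigherThanNext index array →
    ifHigherThanNext index array = ifHigherThanNext_alt index array := by
  intro index array
  fun_induction ifHigherThanNext index array
  next =>
    intro _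
    rw [ifHigherThanNext_alt, PySem.List.pyRange_one_eq_nil (by omega)]
    rfl
  next x h ha =>
    intro hpre
    exfalso
    have hnone := (PySem.List.pyGet?_eq_none_iff array x).mp ha
    unfold PySem.Raise.InRange at hnone
    rcases hpre with hIn | heq
    · exact hnone ⟨hIn.1, hIn.2⟩
    · exact h heq
  next x h a ha hb =>
    intro hpre
    exfalso
    have hnone := (PySem.List.pyGet?_eq_none_iff array (x + 1)).mp hb
    unfold PySem.Raise.InRange at hnone
    rcases hpre with hIn | heq
    · obtain ⟨h1, h2⟩ := hIn
      exact hnone ⟨by omega, by omega⟩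
    · exact h heq
  next x h a ha b hb hgt =>
    intro _
    obtain ⟨h1, h2⟩ := pyGet?_some_bounds array (x + 1) b hb
    rw [ifHigherThanNext_alt, PySem.List.pyRange_one_cons (by omega), pvAltGo, ha, hb]
    simp [show a ≠ b from by omega, hgt]
  next x h b hb ha hgt ih =>
    intro _
    obtain ⟨h1, h2⟩ := pyGet?_some_bounds array (x + 1) b hb
    have hR : ifHigherThanNext_alt x array =
        pvAltGo array (PySem.List.pyRange (x + 1) ((array.length : Int) - 1) 1) := by
      rw [ifHigherThanNext_alt, PySem.List.pyRange_one_cons (by omega), pvAltGo, ha, hb]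
      simp
    have hI := ih (Or.inl ⟨by omega, by omega⟩)
    rw [hI, hR]
    rfl
  next x h a ha b hb hgt hne =>
    intro _
    obtain ⟨h1, h2⟩ := pyGet?_some_bounds array (x + 1) b hb
    rw [ifHigherThanNext_alt, PySem.List.pyRange_one_cons (by omega), pvAltGo, ha, hb]
    simp [hne, hgt]

-- ===== VERDICT (by name: the statement is the Claim_ definition above) =====
theorem ifHigherThanNext_spec : Claim_equal_ifHigherThanNext := by
  intro index array _ hpre
  unfold Spec_ifHigherThanNext
  exact key_equiv index array hpre
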